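-- pv_equiv track=rewrite | github.com/Fuad-I/FooBar | bringing-gun-to-a-trainer-fight.py | get_reflections
-- ===== SOURCE A (Python) =====
-- from math import atan2, ceil
--
-- def get_reflections(position, dimensions, distance):
--     width, height = dimensions
--     x0, y0 = position
--     x_values, y_values = [x0, -x0], [y0, -y0]
--     dx, dy = width - x0, height - y0
--
--     num_horizontal_reflections = int(ceil((x0 + distance) / width))
--     num_vertical_reflections = int(ceil((y0 + distance) / height))
--
--     x, y = x0, y0
--     for i in range(num_horizontal_reflections):
--         x += 2 * x0 if i % 2 else 2 * dx
--         x_values.extend([x, -x])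
--
--     for i in range(num_vertical_reflections):
--         y += 2 * y0 if i % 2 else 2 * dy
--         y_values.extend([y, -y])
--
--     reflected_coordinates = list()
--     for x_pos in x_values:
--         for y_pos in y_values:
--             reflected_coordinates.append([x_pos, y_pos])
--
--     return reflected_coordinates
-- ===== SOURCE B (Python) =====
-- def get_reflections(position, dimensions, distance):
--     width, height = dimensions
--     x0, y0 = position
--     # integer ceiling division, exact where A's float ceil is exact on the stated domain
--     num_h = -((-(x0 + distance)) // width)
--     num_v = -((-(y0 + distance)) // height)
--
--     def axis_values(c0, size, n):
--         out = [c0, -c0]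
--         for k in range(1, n + 1):
--             v = k * size + c0 if k % 2 == 0 else (k + 1) * size - c0
--             out.extend([v, -v])
--         return out
--
--     xs = axis_values(x0, width, num_h)
--     ys = axis_values(y0, height, num_v)
--     return [[x, y] for x in xs for y in ys]
-- ===== Notes on version B (the rewrite author's own statement) =====
-- stated objective: simpler
-- what changed: Replaces A's two cumulative-accumulator reflection loops with a direct closed-form value per reflection index (k*size+c0 for even k, (k+1)*size-c0 for odd k) and the nested append loops with a comprehension; the float ceil is replaced by exact integer ceiling division.
import Mathlib
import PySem

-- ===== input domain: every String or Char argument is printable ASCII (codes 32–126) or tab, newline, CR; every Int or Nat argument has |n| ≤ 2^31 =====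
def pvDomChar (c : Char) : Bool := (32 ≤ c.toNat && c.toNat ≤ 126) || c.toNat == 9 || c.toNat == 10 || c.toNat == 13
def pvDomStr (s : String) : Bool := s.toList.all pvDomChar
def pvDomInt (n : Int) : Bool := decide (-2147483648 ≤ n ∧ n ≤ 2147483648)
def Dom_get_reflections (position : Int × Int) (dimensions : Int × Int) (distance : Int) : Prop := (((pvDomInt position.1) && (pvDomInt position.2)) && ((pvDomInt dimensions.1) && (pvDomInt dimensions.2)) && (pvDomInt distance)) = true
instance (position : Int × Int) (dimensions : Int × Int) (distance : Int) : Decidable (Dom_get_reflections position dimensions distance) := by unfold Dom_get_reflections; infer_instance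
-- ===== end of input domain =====

-- B replaces A's cumulative reflection accumulators with a closed-form value per
-- reflection index and the nested append loops with a flatMap/map product (simpler).

-- ===== PORT A =====
-- int(ceil(a / b)) on ints: exact as integer ceiling division -((-a)//b) on the stated
-- domain (|a| ≤ 2^32 < 2^53, so the float division rounds without crossing an integer).
def pyCeilDiv (a b : Int) : Int := -(PySem.Int.floordiv (-a) b)

def get_reflections (position : Int × Int) (dimensions : Int × Int) (distance : Int) : List (List Int) :=
  let width := dimensions.1; let height := dimensions.2
  let x0 := position.1; let y0 := position.2
  let x_values : List Int := [x0, -x0]; let y_values : List Int := [y0, -y0]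
  let dx := width - x0; let dy := height - y0
  let num_horizontal_reflections := pyCeilDiv (x0 + distance) width
  let num_vertical_reflections := pyCeilDiv (y0 + distance) height
  let xs := (PySem.List.pyRange 0 num_horizontal_reflections 1).foldl
      (fun (st : Int × List Int) i =>
        let x := st.1 + (if PySem.Int.mod i 2 ≠ 0 then 2 * x0 else 2 * dx)
        (x, st.2 ++ [x, -x])) (x0, x_values)
  let ys := (PySem.List.pyRange 0 num_vertical_reflections 1).foldl
      (fun (st : Int × List Int) i =>
        let y := st.1 + (if PySem.Int.mod i 2 ≠ 0 then 2 * y0 else 2 * dy)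
        (y, st.2 ++ [y, -y])) (y0, y_values)
  xs.2.foldl (fun acc x_pos =>
    ys.2.foldl (fun acc2 y_pos => acc2 ++ [[x_pos, y_pos]]) acc) []

-- ===== PORT B =====
def axisValues (c0 size : Int) (n : Int) : List Int :=
  [c0, -c0] ++ (PySem.List.pyRange 1 (n + 1) 1).flatMap (fun k =>
    let v := if PySem.Int.mod k 2 = 0 then k * size + c0 else (k + 1) * size - c0
    [v, -v])

def get_reflections_alt (position : Int × Int) (dimensions : Int × Int) (distance : Int) : List (List Int) :=
  let width := dimensions.1; let height := dimensions.2
  let x0 := position.1; let y0 := position.2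
  let num_h := -(PySem.Int.floordiv (-(x0 + distance)) width)
  let num_v := -(PySem.Int.floordiv (-(y0 + distance)) height)
  let xs := axisValues x0 width num_h
  let ys := axisValues y0 height num_v
  xs.flatMap (fun x => ys.map (fun y => [x, y]))

-- ===== PRECONDITION & SPEC =====
-- Pre_ excludes dimensions with a zero width or height, on which A raises ZeroDivisionError.
def Pre_get_reflections (position : Int × Int) (dimensions : Int × Int) (distance : Int) : Prop :=
  dimensions.1 ≠ 0 ∧ dimensions.2 ≠ 0
instance (position : Int × Int) (dimensions : Int × Int) (distance : Int) : Decidable (Pre_get_reflections position dimensions distance) := by unfold Pre_get_reflections; infer_instance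

def pvWitness_get_reflections : (Int × Int) × (Int × Int) × Int := ((1, 2), (3, 2), 4)

def Spec_get_reflections (position : Int × Int) (dimensions : Int × Int) (distance : Int) (out : List (List Int)) : Prop := out = get_reflections_alt position dimensions distance
instance (position : Int × Int) (dimensions : Int × Int) (distance : Int) (out : List (List Int)) : Decidable (Spec_get_reflections position dimensions distance out) := by unfold Spec_get_reflections; infer_instance

-- ===== CLAIM (what is proved, stated in full; the proofs are below) =====
def Claim_equal_get_reflections : Prop := ∀ (position : Int × Int) (dimensions : Int × Int) (distance : Int), Dom_get_reflections position dimensions distance → Pre_get_reflections position dimensions distance → Spec_get_reflections position dimensions distance (get_reflections position dimensions distance)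

-- ===== LEMMAS AND PROOFS =====

-- closed form of A's accumulator after n loop iterations
def cf (c0 size : Int) (n : Int) : Int :=
  if PySem.Int.mod n 2 = 0 then n * size + c0 else (n + 1) * size - c0

lemma mod_two_int (n : Int) : PySem.Int.mod n 2 = n % 2 :=
  PySem.Int.mod_eq_emod_of_pos (by norm_num)

lemma loopA_nat (c0 size : Int) (n : Nat) :
    (PySem.List.pyRange 0 (n : Int) 1).foldl
      (fun (st : Int × List Int) i =>
        let x := st.1 + (if PySem.Int.mod i 2 ≠ 0 then 2 * c0 else 2 * (size - c0))
        (x, st.2 ++ [x, -x])) (c0, [c0, -c0])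
    = (cf c0 size n, axisValues c0 size n) := by
  induction n with
  | zero =>
    simp [PySem.List.pyRange_one_eq_nil, axisValues, cf, PySem.Int.mod]
  | succ m ih =>
    have h1 : (((m : Nat) + 1 : Nat) : Int) = (m : Int) + 1 := by push_cast; ring
    rw [h1, PySem.List.pyRange_one_succ_right (by omega), List.foldl_append, ih]
    simp only [List.foldl_cons, List.foldl_nil]
    have hax : axisValues c0 size ((m : Int) + 1)
        = axisValues c0 size (m : Int)
          ++ [cf c0 size ((m : Int) + 1), -(cf c0 size ((m : Int) + 1))] := by
      unfold axisValues
      rw [PySem.List.pyRange_one_succ_right (by omega), List.flatMap_append]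
      simp [cf]
    rw [hax]
    have hstep : cf c0 size (m : Int)
        + (if PySem.Int.mod ((m : Int)) 2 ≠ 0 then 2 * c0 else 2 * (size - c0))
        = cf c0 size ((m : Int) + 1) := by
      simp only [cf, mod_two_int]
      rcases Int.emod_two_eq (m : Int) with he | he
      · rw [if_pos he, if_neg (by simp [he]), if_neg (by omega)]; ring
      · rw [if_neg (by simp [he]), if_pos (by simp [he]), if_pos (by omega)]; ring
    rw [hstep]

lemma loopA_int (c0 size : Int) (n : Int) :
    ((PySem.List.pyRange 0 n 1).foldl
      (fun (st : Int × List Int) i =>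
        let x := st.1 + (if PySem.Int.mod i 2 ≠ 0 then 2 * c0 else 2 * (size - c0))
        (x, st.2 ++ [x, -x])) (c0, [c0, -c0])).2
    = axisValues c0 size n := by
  by_cases h : n ≤ 0
  · rw [PySem.List.pyRange_one_eq_nil h]
    unfold axisValues
    rw [PySem.List.pyRange_one_eq_nil (by omega)]
    simp
  · have hn : n = ((n.toNat : Nat) : Int) := by omega
    rw [hn, loopA_nat]

lemma inner_prod (ys : List Int) (x : Int) (acc : List (List Int)) :
    ys.foldl (fun acc2 y => acc2 ++ [[x, y]]) acc = acc ++ ys.map (fun y => [x, y]) := by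
  induction ys generalizing acc with
  | nil => simp
  | cons y t ih => simp [ih]

lemma prod_foldl (xs ys : List Int) (acc : List (List Int)) :
    xs.foldl (fun a x => ys.foldl (fun a2 y => a2 ++ [[x, y]]) a) acc
    = acc ++ xs.flatMap (fun x => ys.map (fun y => [x, y])) := by
  induction xs generalizing acc with
  | nil => simp
  | cons x t ih =>
    rw [List.foldl_cons, ih, inner_prod]
    simp [List.flatMap_cons, List.append_assoc]

-- ===== VERDICT (by name: the statement is the Claim_ definition above) =====
theorem get_reflections_spec : Claim_equal_get_reflections := by
  intro position dimensions distance _hDom _hPre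
  unfold Spec_get_reflections get_reflections get_reflections_alt pyCeilDiv
  simp only [loopA_int, prod_foldl, List.nil_append]
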